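-- pv_equiv track=rewrite | github.com/krniya/Algorithms | Python/Arrays/L_largestInterger.py | largestInterger
-- ===== SOURCE A (Python) =====
-- def largestInterger(num):
--     num = [int(i) for i in str(num)]
--     odd, even = [],[]
--     for i in num:
--         if i%2:
--             odd.append(i)
--         else:
--             even.append(i)
--     res = 0
--     even.sort()
--     odd.sort()
--     for i in num:
--         if i%2:
--             res = res*10 + odd.pop()
--         else:
--             res = res*10 + even.pop()
--     return res
-- ===== SOURCE B (Python) =====
-- def largestInterger(num):
--     digits = [int(i) for i in str(num)]
--     cnt = [0] * 10
--     for d in digits: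
--         cnt[d] += 1
--     desc_odd, desc_even = [], []
--     for v in range(9, -1, -1):
--         if v % 2:
--             desc_odd = desc_odd + [v] * cnt[v]
--         else:
--             desc_even = desc_even + [v] * cnt[v]
--     res = 0
--     for d in digits:
--         if d % 2:
--             res = res * 10 + desc_odd[0]
--             desc_odd = desc_odd[1:]
--         else:
--             res = res * 10 + desc_even[0]
--             desc_even = desc_even[1:]
--     return res
-- ===== Notes on version B (the rewrite author's own statement) =====
-- stated objective: alternative
-- what changed: B replaces the two comparison sorts and destructive pop()s with a counting sort: one frequency table over the ten digit values, expanded into descending per-parity runs that are then consumed front-to-back.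
import Mathlib
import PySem

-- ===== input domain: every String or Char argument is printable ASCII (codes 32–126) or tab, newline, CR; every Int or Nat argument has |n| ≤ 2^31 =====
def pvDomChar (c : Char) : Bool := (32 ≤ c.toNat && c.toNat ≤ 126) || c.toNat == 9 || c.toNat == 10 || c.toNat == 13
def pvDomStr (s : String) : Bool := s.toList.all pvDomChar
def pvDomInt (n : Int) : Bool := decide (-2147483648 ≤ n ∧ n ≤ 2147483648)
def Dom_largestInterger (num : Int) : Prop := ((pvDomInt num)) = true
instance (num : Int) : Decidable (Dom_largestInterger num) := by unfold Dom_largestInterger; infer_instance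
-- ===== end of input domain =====

-- B rebuilds the number with a counting sort over the ten digit values instead of A's two comparison sorts with pop().

-- shared front end of BOTH sources: the identical line 'num = [int(i) for i in str(num)]'
-- (int(i) ported as ofChars?, total via getD 0; under Pre_ every character is a digit so the default is never taken)
def pvDigits (num : Int) : List Int :=
  (PySem.Int.toChars num).map (fun c => (PySem.Int.ofChars? [c]).getD 0)

-- ===== PORT A =====
def largestInterger (num : Int) : Int :=
  let numL := pvDigits num
  let p := numL.foldl (fun (p : List Int × List Int) i =>
      if PySem.Int.mod i 2 ≠ 0 then (p.1 ++ [i], p.2) else (p.1, p.2 ++ [i])) ([], [])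
  let even := PySem.List.sorted p.2 (fun x => x) false
  let odd := PySem.List.sorted p.1 (fun x => x) false
  -- odd.pop() / even.pop(): PySem.List.pop? at -1; the lists are never empty when popped (parity counts match)
  let st := numL.foldl (fun (st : Int × List Int × List Int) i =>
      if PySem.Int.mod i 2 ≠ 0 then
        let r := (PySem.List.pop? st.2.1 (-1)).getD (0, [])
        (st.1 * 10 + r.1, r.2, st.2.2)
      else
        let r := (PySem.List.pop? st.2.2 (-1)).getD (0, [])
        (st.1 * 10 + r.1, st.2.1, r.2)) (0, odd, even)
  st.1

-- ===== PORT B =====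
def largestInterger_alt (num : Int) : Int :=
  let digits := pvDigits num
  let cnt := digits.foldl
      (fun cnt d => PySem.List.pySetD cnt d (PySem.List.pyGetD cnt d 0 + 1))
      (List.replicate 10 (0 : Int))
  let q := (PySem.List.pyRange 9 (-1) (-1)).foldl (fun (q : List Int × List Int) v =>
      if PySem.Int.mod v 2 ≠ 0 then
        (q.1 ++ PySem.List.pyRepeat [v] (PySem.List.pyGetD cnt v 0), q.2)
      else
        (q.1, q.2 ++ PySem.List.pyRepeat [v] (PySem.List.pyGetD cnt v 0))) ([], [])
  -- desc_odd[0] / desc_odd[1:]: pyGetD / slice; the lists are never empty when read (parity counts match)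
  let st := digits.foldl (fun (st : Int × List Int × List Int) d =>
      if PySem.Int.mod d 2 ≠ 0 then
        (st.1 * 10 + PySem.List.pyGetD st.2.1 0 0, PySem.List.slice st.2.1 (some 1) none, st.2.2)
      else
        (st.1 * 10 + PySem.List.pyGetD st.2.2 0 0, st.2.1, PySem.List.slice st.2.2 (some 1) none)) (0, q.1, q.2)
  st.1

-- ===== PRECONDITION & SPEC =====
-- A (and B) raise ValueError on negative num: int('-') fails on the sign character of str(num).
def Pre_largestInterger (num : Int) : Prop := 0 ≤ num
instance (num : Int) : Decidable (Pre_largestInterger num) := by unfold Pre_largestInterger; infer_instance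
def pvWitness_largestInterger : Int := (31425)

def Spec_largestInterger (num : Int) (out : Int) : Prop := out = largestInterger_alt num
instance (num : Int) (out : Int) : Decidable (Spec_largestInterger num out) := by unfold Spec_largestInterger; infer_instance

-- ===== CLAIM (what is proved, stated in full; the proofs are below) =====
def Claim_equal_largestInterger : Prop := ∀ (num : Int), Dom_largestInterger num → Pre_largestInterger num → Spec_largestInterger num (largestInterger num)

-- ===== LEMMAS AND PROOFS =====

-- every digit produced by the shared front end lies in [0, 9]
def pvDigitChars : List Char := ['0','1','2','3','4','5','6','7','8','9']

theorem pv_digitChar_mem (k : Nat) (hk : k < 10) : Nat.digitChar k ∈ pvDigitChars := by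
  interval_cases k <;> decide

theorem pv_mem_toDigitsCore (f : Nat) : ∀ (n : Nat) (l : List Char),
    (∀ c ∈ l, c ∈ pvDigitChars) → ∀ c ∈ Nat.toDigitsCore 10 f n l, c ∈ pvDigitChars := by
  induction f with
  | zero => intro n l hl; simpa [Nat.toDigitsCore] using hl
  | succ f ih =>
    intro n l hl c hc
    rw [Nat.toDigitsCore] at hc
    by_cases h : n / 10 = 0
    · rw [if_pos h] at hc
      rcases List.mem_cons.mp hc with h1 | h1
      · subst h1; exact pv_digitChar_mem _ (Nat.mod_lt _ (by norm_num))
      · exact hl _ h1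
    · rw [if_neg h] at hc
      refine ih _ _ ?_ _ hc
      intro c' hc'
      rcases List.mem_cons.mp hc' with h1 | h1
      · subst h1; exact pv_digitChar_mem _ (Nat.mod_lt _ (by norm_num))
      · exact hl _ h1

theorem pv_digit_val (c : Char) (hc : c ∈ pvDigitChars) :
    0 ≤ (PySem.Int.ofChars? [c]).getD 0 ∧ (PySem.Int.ofChars? [c]).getD 0 ≤ 9 := by
  fin_cases hc <;> decide

theorem pv_digits_bound (num : Int) (h : 0 ≤ num) :
    ∀ d ∈ pvDigits num, 0 ≤ d ∧ d ≤ 9 := by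
  intro d hd
  rcases List.mem_map.mp hd with ⟨c, hc, rfl⟩
  apply pv_digit_val
  rw [PySem.Int.toChars, if_neg (by omega)] at hc
  exact pv_mem_toDigitsCore _ _ _ (by simp) _ hc

-- A's first loop is a partition into the two parity filters
theorem pv_split (P : Int → Prop) [DecidablePred P] (l : List Int) : ∀ (a b : List Int),
    l.foldl (fun (p : List Int × List Int) i =>
      if P i then (p.1 ++ [i], p.2) else (p.1, p.2 ++ [i])) (a, b)
    = (a ++ l.filter (fun i => decide (P i)),
       b ++ l.filter (fun i => !decide (P i))) := by
  induction l with
  | nil => simp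
  | cons x t ih =>
    intro a b
    simp only [List.foldl_cons, List.filter_cons]
    by_cases h : P x
    · simp [h, ih]
    · simp [h, ih]

-- B's count table: entry v holds the number of occurrences of v in the processed digits
theorem pv_counts (l : List Int) (hl : ∀ d ∈ l, 0 ≤ d ∧ d ≤ 9) : ∀ (cnt : List Int),
    cnt.length = 10 →
    (l.foldl (fun cnt d => PySem.List.pySetD cnt d (PySem.List.pyGetD cnt d 0 + 1)) cnt).length = 10 ∧
    ∀ v : Nat, v < 10 →
      (l.foldl (fun cnt d => PySem.List.pySetD cnt d (PySem.List.pyGetD cnt d 0 + 1)) cnt).getD v 0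
        = cnt.getD v 0 + (l.count (v : Int) : Int) := by
  induction l with
  | nil => intro cnt hc; simp [hc]
  | cons x t ih =>
    intro cnt hc
    obtain ⟨hx0, hx9⟩ := hl x (by simp)
    have hxn : x.toNat < 10 := by omega
    have hset : PySem.List.pySetD cnt x (PySem.List.pyGetD cnt x 0 + 1)
        = cnt.set x.toNat (PySem.List.pyGetD cnt x 0 + 1) := PySem.List.pySetD_of_nonneg cnt _ hx0
    have hlen : (cnt.set x.toNat (PySem.List.pyGetD cnt x 0 + 1)).length = 10 := by simp [hc]
    have ih' := ih (fun d hd => hl d (by simp [hd])) _ hlen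
    simp only [List.foldl_cons, hset]
    refine ⟨ih'.1, ?_⟩
    intro v hv
    rw [ih'.2 v hv]
    have hget : PySem.List.pyGetD cnt x 0 = cnt.getD x.toNat 0 := by
      rw [PySem.List.pyGetD_eq_getElem cnt 0 hx0 (by rw [hc]; omega)]
      rw [List.getD_eq_getElem?_getD, List.getElem?_eq_getElem (by omega)]
      rfl
    have hcount : (x :: t).count (v : Int) = t.count (v : Int) + (if x = (v : Int) then 1 else 0) := by
      simp [List.count_cons]
    by_cases hxv : x = (v : Int)
    · have : x.toNat = v := by omega
      rw [this] at hset ⊢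
      rw [List.getD_eq_getElem?_getD, List.getElem?_set_self (by omega), hcount]
      simp [hxv]
      ring
    · have hne : x.toNat ≠ v := by omega
      rw [List.getD_eq_getElem?_getD, List.getElem?_set_ne (by omega), hcount]
      simp [hxv, List.getD_eq_getElem?_getD]

-- B's expansion loop appends the per-parity descending runs
theorem pv_expand (P : Int → Prop) [DecidablePred P] (c : Int → Int) (vs : List Int) : ∀ (a b : List Int),
    vs.foldl (fun (q : List Int × List Int) v =>
      if P v then
        (q.1 ++ PySem.List.pyRepeat [v] (c v), q.2)
      else
        (q.1, q.2 ++ PySem.List.pyRepeat [v] (c v))) (a, b)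
    = (a ++ (vs.filter (fun v => decide (P v))).flatMap (fun v => List.replicate (c v).toNat v),
       b ++ (vs.filter (fun v => !decide (P v))).flatMap (fun v => List.replicate (c v).toNat v)) := by
  induction vs with
  | nil => simp
  | cons x t ih =>
    intro a b
    simp only [List.foldl_cons, List.filter_cons]
    by_cases h : P x
    · rw [if_pos h, ih]
      simp [h, PySem.List.pyRepeat_singleton]
    · rw [if_neg h, ih]
      simp [h, PySem.List.pyRepeat_singleton]

-- count / permutation / order of the descending count-expansion
theorem pv_count_expand (ds : List Int) (vs : List Int) (hnd : vs.Nodup) (a : Int) :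
    (vs.flatMap (fun v => List.replicate (ds.count v) v)).count a
      = if a ∈ vs then ds.count a else 0 := by
  induction vs with
  | nil => simp
  | cons v t ih =>
    rcases List.nodup_cons.mp hnd with ⟨hv, ht⟩
    simp only [List.flatMap_cons, List.count_append, ih ht, List.count_replicate, List.mem_cons]
    by_cases hav : a = v
    · subst hav; simp [hv]
    · simp [hav, Ne.symm hav]

theorem pv_perm_expand (ds : List Int) (vs : List Int) (hnd : vs.Nodup)
    (hcov : ∀ d ∈ ds, d ∈ vs) :
    (vs.flatMap (fun v => List.replicate (ds.count v) v)).Perm ds := by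
  rw [List.perm_iff_count]
  intro a
  rw [pv_count_expand ds vs hnd a]
  by_cases ha : a ∈ vs
  · simp [ha]
  · have : a ∉ ds := fun h => ha (hcov a h)
    simp [ha, List.count_eq_zero.mpr this]

theorem pv_pairwise_expand (ds : List Int) (vs : List Int) (hp : vs.Pairwise (· > ·)) :
    (vs.flatMap (fun v => List.replicate (ds.count v) v)).Pairwise (fun a b => b ≤ a) := by
  induction vs with
  | nil => simp
  | cons v t ih =>
    rcases List.pairwise_cons.mp hp with ⟨hv, ht⟩
    simp only [List.flatMap_cons]
    rw [List.pairwise_append]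
    refine ⟨List.pairwise_replicate.mpr (Or.inr le_rfl), ih ht, ?_⟩
    intro a ha b hb
    rcases List.mem_replicate.mp ha with ⟨-, rfl⟩
    rcases List.mem_flatMap.mp hb with ⟨w, hw, hbw⟩
    rcases List.mem_replicate.mp hbw with ⟨-, hbeq⟩
    subst hbeq
    exact le_of_lt (hv _ hw)

-- the descending count-expansion is the reverse of Python's ascending sort
theorem pv_sorted_eq_rev (ds : List Int) (vs : List Int) (hnd : vs.Nodup)
    (hcov : ∀ d ∈ ds, d ∈ vs) (hp : vs.Pairwise (· > ·)) :
    PySem.List.sorted ds (fun x => x) false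
      = (vs.flatMap (fun v => List.replicate (ds.count v) v)).reverse := by
  apply PySem.List.sorted_id_eq_of_perm_of_pairwise
  · exact (List.reverse_perm _).trans (pv_perm_expand ds vs hnd hcov)
  · rw [List.pairwise_reverse]
    exact pv_pairwise_expand ds vs hp

-- popping the value at -1 is (last element, all but last) — and [] stays [] (never reached)
theorem pv_pop_last (xs : List Int) :
    (PySem.List.pop? xs (-1)).getD (0, []) = (xs.getLast?.getD 0, xs.dropLast) := by
  induction xs using List.reverseRecOn with
  | nil => decide
  | append_singleton ys y ih =>
    rw [PySem.List.pop?_last]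
    simp

theorem pv_head_rev (xs : List Int) : PySem.List.pyGetD xs.reverse 0 0 = xs.getLast?.getD 0 := by
  rw [PySem.List.pyGetD_zero, List.getD, ← List.head?_eq_getElem?, List.head?_reverse]

-- consuming by pop() from ascending lists = consuming head-first from their reverses
theorem pv_consume (l : List Int) : ∀ (res : Int) (ao ae : List Int),
    (l.foldl (fun (st : Int × List Int × List Int) i =>
      if PySem.Int.mod i 2 ≠ 0 then
        let r := (PySem.List.pop? st.2.1 (-1)).getD (0, [])
        (st.1 * 10 + r.1, r.2, st.2.2)
      else
        let r := (PySem.List.pop? st.2.2 (-1)).getD (0, [])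
        (st.1 * 10 + r.1, st.2.1, r.2)) (res, ao, ae)).1
    = (l.foldl (fun (st : Int × List Int × List Int) d =>
      if PySem.Int.mod d 2 ≠ 0 then
        (st.1 * 10 + PySem.List.pyGetD st.2.1 0 0, PySem.List.slice st.2.1 (some 1) none, st.2.2)
      else
        (st.1 * 10 + PySem.List.pyGetD st.2.2 0 0, st.2.1, PySem.List.slice st.2.2 (some 1) none))
      (res, ao.reverse, ae.reverse)).1 := by
  induction l with
  | nil => simp
  | cons x t ih =>
    intro res ao ae
    simp only [List.foldl_cons]
    by_cases h : PySem.Int.mod x 2 ≠ 0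
    · rw [if_pos h, if_pos h, pv_pop_last, pv_head_rev,
        PySem.List.slice_from_one, List.tail_reverse]
      exact ih _ _ _
    · rw [if_neg h, if_neg h, pv_pop_last, pv_head_rev,
        PySem.List.slice_from_one, List.tail_reverse]
      exact ih _ _ _

-- ===== VERDICT (by name: the statement is the Claim_ definition above) =====
theorem largestInterger_spec : Claim_equal_largestInterger := by
  intro num _hdom hpre
  unfold Spec_largestInterger largestInterger largestInterger_alt
  simp only []
  set ds := pvDigits num with hds
  rw [pv_split (fun i => PySem.Int.mod i 2 ≠ 0) ds [] []]
  have hb : ∀ d ∈ ds, 0 ≤ d ∧ d ≤ 9 := pv_digits_bound num hpre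
  set cnt := List.foldl (fun cnt d => PySem.List.pySetD cnt d (PySem.List.pyGetD cnt d 0 + 1))
      (List.replicate 10 (0 : Int)) ds with hcnt
  obtain ⟨hclen, hcval⟩ := pv_counts ds hb (List.replicate 10 0) (by simp)
  rw [← hcnt] at hclen hcval
  have hkey : ∀ v : Int, 0 ≤ v → v ≤ 9 → PySem.List.pyGetD cnt v 0 = ((ds.count v : Nat) : Int) := by
    intro v h0 h9
    have hv : v.toNat < 10 := by omega
    have h1 := hcval v.toNat hv
    rw [PySem.List.pyGetD_eq_getElem cnt 0 h0 (by rw [hclen]; exact_mod_cast by omega)]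
    rw [List.getD_eq_getElem?_getD, List.getElem?_eq_getElem (by omega)] at h1
    simp only [Option.getD_some] at h1
    rw [h1]
    have hz : (List.replicate 10 (0:Int)).getD v.toNat 0 = 0 := by
      rw [List.getD_eq_getElem?_getD, List.getElem?_replicate, if_pos hv]
      rfl
    rw [hz, Int.toNat_of_nonneg h0, zero_add]
  dsimp only
  rw [pv_expand (fun v => PySem.Int.mod v 2 ≠ 0) (fun v => PySem.List.pyGetD cnt v 0)
      (PySem.List.pyRange 9 (-1) (-1)) [] []]
  dsimp only
  simp only [List.nil_append]
  have hro : (PySem.List.pyRange 9 (-1) (-1)).filter (fun i => decide (PySem.Int.mod i 2 ≠ 0)) = [9,7,5,3,1] := by decide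
  have hre : (PySem.List.pyRange 9 (-1) (-1)).filter (fun i => !decide (PySem.Int.mod i 2 ≠ 0)) = [8,6,4,2,0] := by decide
  rw [hro, hre,
    pv_consume ds 0 (PySem.List.sorted (ds.filter (fun i => decide (PySem.Int.mod i 2 ≠ 0))) (fun x => x) false)
      (PySem.List.sorted (ds.filter (fun i => !decide (PySem.Int.mod i 2 ≠ 0))) (fun x => x) false),
    pv_sorted_eq_rev (ds.filter (fun i => decide (PySem.Int.mod i 2 ≠ 0))) [9,7,5,3,1] (by decide)
      (by
        intro d hd
        rcases List.mem_filter.mp hd with ⟨hdm, hpd⟩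
        obtain ⟨h0, h9⟩ := hb d hdm
        interval_cases d <;> first | decide | exact absurd hpd (by decide)) (by decide),
    pv_sorted_eq_rev (ds.filter (fun i => !decide (PySem.Int.mod i 2 ≠ 0))) [8,6,4,2,0] (by decide)
      (by
        intro d hd
        rcases List.mem_filter.mp hd with ⟨hdm, hpd⟩
        obtain ⟨h0, h9⟩ := hb d hdm
        interval_cases d <;> first | decide | exact absurd hpd (by decide)) (by decide),
    List.reverse_reverse, List.reverse_reverse]
  simp only [List.flatMap_cons, List.flatMap_nil, List.append_nil]
  rw [hkey 9 (by norm_num) (by norm_num), hkey 7 (by norm_num) (by norm_num),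
      hkey 5 (by norm_num) (by norm_num), hkey 3 (by norm_num) (by norm_num),
      hkey 1 (by norm_num) (by norm_num), hkey 8 (by norm_num) (by norm_num),
      hkey 6 (by norm_num) (by norm_num), hkey 4 (by norm_num) (by norm_num),
      hkey 2 (by norm_num) (by norm_num), hkey 0 (by norm_num) (by norm_num)]
  simp only [Int.toNat_natCast]
  rw [List.count_filter, List.count_filter, List.count_filter, List.count_filter, List.count_filter,
      List.count_filter, List.count_filter, List.count_filter, List.count_filter, List.count_filter]
  all_goals decide
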